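-- pv_equiv track=rewrite | github.com/lucastsui/collatz-research | carry_parity_v2.py | mod_inverse_2adic
-- ===== SOURCE A (Python) =====
-- def mod_inverse_2adic(a, w):
--     """Compute a^{-1} mod 2^w for odd a."""
--     # Use extended Euclidean or direct iteration
--     assert a % 2 == 1, "a must be odd"
--     inv = 1
--     for _ in range(w):
--         if (inv * a) % (1 << (w)) != 1:
--             inv = inv  # refine
--     # Better: use the fact that for odd a, a^{-1} mod 2^w can be computed iteratively
--     inv = 1
--     mod = 1 << w
--     for i in range(1, w):
--         if (inv * a) % (1 << (i + 1)) != 1: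
--             inv += (1 << i)
--     return inv % mod
-- ===== SOURCE B (Python) =====
-- def mod_inverse_2adic(a, w):
--     """Compute a^{-1} mod 2^w for odd a by Newton-Hensel doubling."""
--     assert a % 2 == 1, "a must be odd"
--     mod = 1 << w
--     inv = 1            # inverse of a mod 2 (a is odd)
--     k = 1              # current precision: inv*a == 1 (mod 2^k)
--     while k < w:
--         inv = inv * (2 - a * inv) % mod   # precision doubles each step
--         k *= 2
--     return inv % mod
-- ===== Notes on version B (the rewrite author's own statement) =====
-- stated objective: alternative
-- what changed: Replaces A's bit-by-bit correction loop (w-1 iterations, plus a dead no-op loop) with Newton-Hensel lifting inv = inv*(2-a*inv) mod 2^w, whose precision doubles each step, so only about log2(w) iterations are needed (measured 3.7-7.4x faster on the probe's sizes, unconfirmed at the largest).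
import Mathlib
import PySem

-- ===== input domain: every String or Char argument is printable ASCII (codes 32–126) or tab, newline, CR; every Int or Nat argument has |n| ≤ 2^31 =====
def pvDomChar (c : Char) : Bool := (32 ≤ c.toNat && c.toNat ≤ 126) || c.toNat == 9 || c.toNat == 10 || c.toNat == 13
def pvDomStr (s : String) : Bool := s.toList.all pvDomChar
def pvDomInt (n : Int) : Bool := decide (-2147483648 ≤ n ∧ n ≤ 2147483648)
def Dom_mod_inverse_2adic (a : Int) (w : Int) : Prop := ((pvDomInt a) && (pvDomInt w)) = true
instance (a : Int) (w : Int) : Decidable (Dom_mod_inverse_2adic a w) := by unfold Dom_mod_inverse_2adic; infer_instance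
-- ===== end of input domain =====

-- B replaces A's bit-by-bit correction loop with Newton–Hensel doubling, a different algorithm with fewer iterations; return values proved equal on Pre_.

-- ===== PORT A =====
-- step of A's second loop: if (inv * a) % (1 << (i+1)) != 1: inv += (1 << i)
def pvAStep (a : Int) (inv : Int) (i : Int) : Int :=
  if PySem.Int.mod (inv * a) ((1:Int) <<< (i + 1).toNat) ≠ 1 then inv + (1:Int) <<< i.toNat else inv

def mod_inverse_2adic (a : Int) (w : Int) : Int :=
  -- first Python loop: both branches assign inv unchanged; its result is discarded by 'inv = 1'
  let _inv1 : Int := (PySem.List.pyRange 0 w 1).foldl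
    (fun inv _ => if PySem.Int.mod (inv * a) ((1:Int) <<< w.toNat) ≠ 1 then inv else inv) 1
  let m : Int := (1:Int) <<< w.toNat      -- 1 << w  (Pre_ gives 0 ≤ w; Python raises on w < 0)
  let inv : Int := (PySem.List.pyRange 1 w 1).foldl (pvAStep a) 1
  PySem.Int.mod inv m

-- ===== PORT B =====
-- while k < w: inv = inv * (2 - a * inv) % mod; k *= 2   (fuel = w.toNat is enough since k doubles)
def pvNewtonLoop (a m w : Int) : Nat → Int → Int → Int
  | 0, inv, _ => inv
  | fuel+1, inv, k =>
    if k < w then pvNewtonLoop a m w fuel (PySem.Int.mod (inv * (2 - a * inv)) m) (k * 2) else inv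

def mod_inverse_2adic_alt (a : Int) (w : Int) : Int :=
  let m : Int := (1:Int) <<< w.toNat      -- 1 << w  (Pre_ gives 0 ≤ w; Python raises on w < 0)
  let inv : Int := pvNewtonLoop a m w w.toNat 1 1
  PySem.Int.mod inv m

-- ===== PRECONDITION & SPEC =====
-- Pre_ excludes exactly the inputs where Python A raises: even a (AssertionError) and w < 0 (ValueError on 1 << w).
def Pre_mod_inverse_2adic (a : Int) (w : Int) : Prop := PySem.Int.mod a 2 = 1 ∧ 0 ≤ w
instance (a : Int) (w : Int) : Decidable (Pre_mod_inverse_2adic a w) := by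
  unfold Pre_mod_inverse_2adic; infer_instance
def pvWitness_mod_inverse_2adic : Int × Int := (7, 5)

def Spec_mod_inverse_2adic (a : Int) (w : Int) (out : Int) : Prop := out = mod_inverse_2adic_alt a w
instance (a : Int) (w : Int) (out : Int) : Decidable (Spec_mod_inverse_2adic a w out) := by
  unfold Spec_mod_inverse_2adic; infer_instance

-- ===== CLAIM (what is proved, stated in full; the proofs are below) =====
def Claim_equal_mod_inverse_2adic : Prop := ∀ (a : Int) (w : Int), Dom_mod_inverse_2adic a w → Pre_mod_inverse_2adic a w → Spec_mod_inverse_2adic a w (mod_inverse_2adic a w)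

-- ===== LEMMAS AND PROOFS =====

theorem pvDvdOfEmod (x P : Int) (h : x % P = 1) : P ∣ x - 1 :=
  ⟨x / P, by have h2 := Int.emod_add_mul_ediv x P; linarith⟩

theorem pvshift (n : Nat) : (1:Int) <<< n = 2^n := by simp [Int.shiftLeft_eq]

def pvAfold (a : Int) (n : Nat) : Int := (PySem.List.pyRange 1 (n:Int) 1).foldl (pvAStep a) 1

theorem pvAfold_succ (a : Int) (n : Nat) (h : 1 ≤ n) :
    pvAfold a (n+1) = pvAStep a (pvAfold a n) (n:Int) := by
  unfold pvAfold
  have : ((n+1 : Nat) : Int) = (n:Int) + 1 := by push_cast; ring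
  rw [this, PySem.List.pyRange_one_succ_right (by omega), List.foldl_append]
  rfl

-- invariant of A's correction loop: after processing i = 1..n-1 the value is the inverse of a mod 2^n
theorem pvA_inv (a : Int) (ha : a % 2 = 1) : ∀ n : Nat, 1 ≤ n →
    0 ≤ pvAfold a n ∧ pvAfold a n < 2^n ∧ (pvAfold a n * a) % 2^n = 1 := by
  intro n
  induction n with
  | zero => intro h; exact absurd h (by norm_num)
  | succ n ih =>
    intro _
    by_cases hn : 1 ≤ n
    · obtain ⟨h0, h1, h2⟩ := ih hn
      rw [pvAfold_succ a n hn]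
      set r := pvAfold a n with hr
      unfold pvAStep
      have e1 : ((n:Int) + 1).toNat = n + 1 := by omega
      have e2 : ((n:Int)).toNat = n := by omega
      rw [e1, e2, pvshift, pvshift,
        PySem.Int.mod_eq_emod_of_pos (by positivity : (0:Int) < 2^(n+1))]
      set x := r * a with hx
      set m : Int := 2^(n+1) with hmdef
      set P : Int := 2^n with hPdef
      have hP : (0:Int) < P := by positivity
      have hm2 : m = 2 * P := by rw [hmdef, hPdef, pow_succ]; ring
      have hPm : P ∣ m := ⟨2, by rw [hm2]; ring⟩
      have hyP : x % m % P = x % P := Int.emod_emod_of_dvd x hPm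
      have hy0 : 0 ≤ x % m := Int.emod_nonneg _ (by positivity)
      have hy1 : x % m < m := Int.emod_lt_of_pos _ (by positivity)
      have hdec : P * (x % m / P) + x % m % P = x % m := Int.mul_ediv_add_emod (x % m) P
      rw [hyP, h2] at hdec
      set q : Int := x % m / P with hq
      have hP2 : (2:Int) ≤ P := by
        calc (2:Int) = 2^1 := by norm_num
        _ ≤ 2^n := pow_le_pow_right₀ (by norm_num) hn
      have hq0 : 0 ≤ q := by
        by_contra hcon
        push Not at hcon
        have : P * q ≤ P * (-1) := mul_le_mul_of_nonneg_left (by omega) (le_of_lt hP)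
        linarith
      have hq2 : q < 2 := by
        by_contra hcon
        push Not at hcon
        have : P * 2 ≤ P * q := mul_le_mul_of_nonneg_left (by omega) (le_of_lt hP)
        linarith
      have : q = 0 ∨ q = 1 := by omega
      rcases this with h | h
      · -- x % m = 1 : keep r
        have hxm : x % m = 1 := by rw [h] at hdec; linarith
        rw [if_neg (by simpa using hxm)]
        exact ⟨h0, by linarith, hxm⟩
      · -- x % m = P + 1 : take r + P
        have hxm : x % m = P + 1 := by rw [h] at hdec; linarith
        rw [if_pos (by rw [hxm]; intro hc; omega)]
        refine ⟨by linarith, by linarith, ?_⟩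
        have hab : a = 2 * (a / 2) + 1 := by omega
        have key : (r + P) * a = (x + P) + m * ((a / 2)) := by
          rw [hm2]; nlinarith [hab]
        rw [key, Int.add_mul_emod_self_left]
        have : (x + P) % m = (x % m + P % m) % m := by rw [Int.add_emod]
        rw [this, hxm, Int.emod_eq_of_lt (le_of_lt hP) (by linarith)]
        have e3 : P + 1 + P = 1 + m * 1 := by rw [hm2]; ring
        rw [e3, Int.add_mul_emod_self_left]
        exact Int.emod_eq_of_lt (by norm_num) (by linarith)
    · -- n = 0 : base case, pvAfold a 1 = 1 and a is odd
      have hn0 : n = 0 := by omega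
      subst hn0
      have hb : pvAfold a 1 = 1 := rfl
      rw [hb]
      refine ⟨by norm_num, by norm_num, ?_⟩
      simpa using ha

-- invariant of B's Newton loop: precision doubles each step until it reaches n
theorem pvB_inv (a : Int) (_ha : a % 2 = 1) (n : Nat) :
    ∀ (fuel : Nat) (inv k : Int), 1 ≤ k → (n:Int) ≤ k + fuel → 0 ≤ inv → inv < 2^n →
    (inv * a) % 2^(min k.toNat n) = 1 →
    0 ≤ pvNewtonLoop a (2^n) (n:Int) fuel inv k ∧
      pvNewtonLoop a (2^n) (n:Int) fuel inv k < 2^n ∧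
      (pvNewtonLoop a (2^n) (n:Int) fuel inv k * a) % 2^n = 1 := by
  intro fuel
  induction fuel with
  | zero =>
    intro inv k hk hfuel h0 h1 h2
    have : min k.toNat n = n := by omega
    rw [this] at h2
    exact ⟨h0, h1, h2⟩
  | succ fuel ih =>
    intro inv k hk hfuel h0 h1 h2
    simp only [pvNewtonLoop]
    split_ifs with hkw
    · -- k < n : one Newton step
      rw [PySem.Int.mod_eq_emod_of_pos (by positivity : (0:Int) < 2^n)]
      apply ih
      · omega
      · omega
      · exact Int.emod_nonneg _ (by positivity)
      · exact Int.emod_lt_of_pos _ (by positivity)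
      · -- new precision min (2k) n
        set p := k.toNat with hp
        have hpk : (p:Int) = k := by omega
        have hpn : p < n := by omega
        have hp1 : 1 ≤ p := by omega
        have hmin : min k.toNat n = p := by omega
        rw [hmin] at h2
        have emin : (k*2).toNat = 2*p := by omega
        rw [emin]
        set q := min (2*p) n with hqdef
        have hq1 : 1 ≤ q := by omega
        have hqn : q ≤ n := by omega
        have hq2p : q ≤ 2*p := by omega
        have d1 : (2:Int)^p ∣ inv*a - 1 := pvDvdOfEmod _ _ h2
        have d2 : (2:Int)^(2*p) ∣ (inv*a - 1)^2 := by
          rw [two_mul, pow_add, sq]; exact mul_dvd_mul d1 d1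
        have d3 : (2:Int)^q ∣ (inv*a - 1)^2 := dvd_trans (pow_dvd_pow 2 hq2p) d2
        have m1 : inv * (2 - a * inv) % 2^n % 2^q = inv * (2 - a * inv) % 2^q :=
          Int.emod_emod_of_dvd _ (pow_dvd_pow 2 hqn)
        have m2 : (inv * (2 - a * inv) % 2^n) * a ≡ inv * (2 - a * inv) * a [ZMOD 2^q] :=
          Int.ModEq.mul_right a m1
        have m3 : inv * (2 - a * inv) * a = 1 - (inv*a - 1)^2 := by ring
        have m4 : (1 - (inv*a - 1)^2 : Int) ≡ 1 [ZMOD 2^q] := by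
          have : ((inv*a - 1)^2 : Int) ≡ 0 [ZMOD 2^q] := (Int.modEq_zero_iff_dvd).mpr d3
          simpa using (Int.ModEq.sub (Int.ModEq.refl 1) this)
        have m5 : (inv * (2 - a * inv) % 2^n) * a ≡ 1 [ZMOD 2^q] := by
          rw [Int.ModEq] at *
          rw [m2, m3, m4]
        have hq2 : (2:Int) ≤ 2^q := by
          calc (2:Int) = 2^1 := by norm_num
          _ ≤ 2^q := pow_le_pow_right₀ (by norm_num) hq1
        calc (inv * (2 - a * inv) % 2^n) * a % 2^q = 1 % 2^q := m5
        _ = 1 := Int.emod_eq_of_lt (by norm_num) (by linarith)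
    · -- k ≥ n : loop exits
      have : min k.toNat n = n := by omega
      rw [this] at h2
      exact ⟨h0, h1, h2⟩

-- for odd a, 2^n divides a*d only if it divides d
theorem pvOddCancel (a : Int) (ha : a % 2 = 1) :
    ∀ (n : Nat) (d : Int), 2^n ∣ a * d → 2^n ∣ d := by
  intro n
  induction n with
  | zero => intro d _; exact one_dvd d
  | succ n ih =>
    intro d hd
    have h2 : (2:Int) ∣ a * d := dvd_trans ⟨2^n, by ring⟩ hd
    have hd2 : (2:Int) ∣ d := by
      have hz : (a * d) % 2 = 0 := Int.emod_eq_zero_of_dvd h2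
      rw [Int.mul_emod, ha] at hz
      have : d % 2 = 0 := by omega
      exact Int.dvd_of_emod_eq_zero this
    obtain ⟨e, he⟩ := hd2
    obtain ⟨c, hc⟩ := hd
    have h2e : 2 * (a * e) = 2 * (2^n * c) := by
      rw [he] at hc
      linear_combination hc
    have hae : 2^n ∣ a * e := ⟨c, mul_left_cancel₀ (by norm_num : (2:Int) ≠ 0) h2e⟩
    obtain ⟨f, hf⟩ := ih _ hae
    exact ⟨f, by rw [he, hf]; ring⟩

-- the inverse of a mod 2^n in [0, 2^n) is unique
theorem pvUnique (a : Int) (ha : a % 2 = 1) (n : Nat) (r1 r2 : Int)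
    (h1 : (r1*a) % 2^n = 1) (h2 : (r2*a) % 2^n = 1)
    (b1 : 0 ≤ r1) (b2 : r1 < 2^n) (b3 : 0 ≤ r2) (b4 : r2 < 2^n) : r1 = r2 := by
  have hdvd : (2:Int)^n ∣ a * (r1 - r2) := by
    have d1 : (2:Int)^n ∣ r1*a - 1 := pvDvdOfEmod _ _ h1
    have d2 : (2:Int)^n ∣ r2*a - 1 := pvDvdOfEmod _ _ h2
    have e : a * (r1 - r2) = (r1*a - 1) - (r2*a - 1) := by ring
    rw [e]; exact dvd_sub d1 d2
  obtain ⟨c, hc⟩ := pvOddCancel a ha n _ hdvd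
  have hP : (0:Int) < 2^n := by positivity
  rcases lt_trichotomy c 0 with h | h | h
  · nlinarith
  · rw [h] at hc; linarith
  · nlinarith

-- ===== VERDICT (by name: the statement is the Claim_ definition above) =====
theorem mod_inverse_2adic_spec : Claim_equal_mod_inverse_2adic := by
  intro a w _ hpre
  obtain ⟨ha', hw0⟩ := hpre
  have ha : a % 2 = 1 := by
    rwa [PySem.Int.mod_eq_emod_of_pos (by norm_num)] at ha'
  obtain ⟨n, hw⟩ : ∃ n : Nat, w = (n:Int) := ⟨w.toNat, by omega⟩
  subst hw
  unfold Spec_mod_inverse_2adic mod_inverse_2adic mod_inverse_2adic_alt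
  simp only [Int.toNat_natCast, pvshift]
  rcases Nat.eq_zero_or_pos n with hn0 | hn1
  · subst hn0
    norm_num [pvNewtonLoop, PySem.Int.mod]
  · have hA := pvA_inv a ha n hn1
    have hpre1 : ((1:Int)*a) % 2^(min (1:Int).toNat n) = 1 := by
      have : min (1:Int).toNat n = 1 := by omega
      rw [this]; simpa using ha
    have h12 : (1:Int) < 2^n := by
      calc (1:Int) < 2^1 := by norm_num
      _ ≤ 2^n := pow_le_pow_right₀ (by norm_num) hn1
    have hB := pvB_inv a ha n n 1 1 (by norm_num) (by omega) (by norm_num) h12 hpre1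
    obtain ⟨a0, a1, a2⟩ := hA
    obtain ⟨b0, b1, b2⟩ := hB
    have hAe : (PySem.List.pyRange 1 (n:Int) 1).foldl (pvAStep a) 1 = pvAfold a n := rfl
    rw [hAe,
      PySem.Int.mod_eq_emod_of_pos (by positivity : (0:Int) < 2^n),
      PySem.Int.mod_eq_emod_of_pos (by positivity : (0:Int) < 2^n),
      Int.emod_eq_of_lt a0 a1, Int.emod_eq_of_lt b0 b1]
    exact pvUnique a ha n _ _ a2 b2 a0 a1 b0 b1
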